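-- pv_equiv track=rewrite | github.com/rayz1065/competitive-programming | advent_of_code/2022/day_15/main.py | calc_in_range
-- ===== SOURCE A (Python) =====
-- def sensor_interval (sensor, searched_y):
--     x, y, bx, by = sensor
--     radius = abs(bx - x) + abs(by - y)
--     x_range = radius - abs(searched_y - y)
--     if x_range < 0:
--         return None
--     return (x - x_range, x + x_range)
--
-- def calc_in_range (sensors, searched_y, min_x, max_x, find_skip=False):
--     # this probably doesn't always work
--     intervals = filter(None, (sensor_interval(sens, searched_y) for sens in sensors))
--     x = min_x
--     s = 0
--     for from_x, to_x in sorted(intervals):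
--         from_x = max(from_x, min_x)
--         to_x = min(to_x, max_x)
--         if x < from_x:
--             if find_skip:
--                 return x + 1
--             x = from_x
--         s += max(0, to_x - x)
--         x = max(x, to_x)
--     return s
-- ===== SOURCE B (Python) =====
-- def sensor_interval(sensor, searched_y):
--     x, y, bx, by = sensor
--     radius = abs(bx - x) + abs(by - y)
--     x_range = radius - abs(searched_y - y)
--     if x_range < 0:
--         return None
--     return (x - x_range, x + x_range)
--
-- def calc_in_range(sensors, searched_y, min_x, max_x, find_skip=False):
--     # Phase 1: coalesce the sorted, clamped intervals into disjoint covered segments.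
--     intervals = sorted(iv for iv in (sensor_interval(s, searched_y) for s in sensors) if iv)
--     merged = []
--     for f, t in intervals:
--         lo = max(f, min_x)
--         hi = max(lo, min(t, max_x))
--         if merged and lo <= merged[-1][1]:
--             if hi > merged[-1][1]:
--                 merged[-1] = (merged[-1][0], hi)
--         else:
--             merged.append((lo, hi))
--     # Phase 2: query the merged segments.
--     if find_skip:
--         prev = min_x
--         for lo, hi in merged:
--             if lo > prev:
--                 return prev + 1
--             prev = hi
--     return sum(hi - lo for lo, hi in merged)
-- ===== Notes on version B (the rewrite author's own statement) =====
-- stated objective: alternative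
-- what changed: A answers with a single stateful sweep (running cursor x and sum s, early return inside the loop); B first coalesces the sorted clamped intervals into an explicit list of disjoint merged segments and then answers by a separate query pass over that list (first-gap scan for find_skip, sum of segment lengths otherwise).
import Mathlib
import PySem

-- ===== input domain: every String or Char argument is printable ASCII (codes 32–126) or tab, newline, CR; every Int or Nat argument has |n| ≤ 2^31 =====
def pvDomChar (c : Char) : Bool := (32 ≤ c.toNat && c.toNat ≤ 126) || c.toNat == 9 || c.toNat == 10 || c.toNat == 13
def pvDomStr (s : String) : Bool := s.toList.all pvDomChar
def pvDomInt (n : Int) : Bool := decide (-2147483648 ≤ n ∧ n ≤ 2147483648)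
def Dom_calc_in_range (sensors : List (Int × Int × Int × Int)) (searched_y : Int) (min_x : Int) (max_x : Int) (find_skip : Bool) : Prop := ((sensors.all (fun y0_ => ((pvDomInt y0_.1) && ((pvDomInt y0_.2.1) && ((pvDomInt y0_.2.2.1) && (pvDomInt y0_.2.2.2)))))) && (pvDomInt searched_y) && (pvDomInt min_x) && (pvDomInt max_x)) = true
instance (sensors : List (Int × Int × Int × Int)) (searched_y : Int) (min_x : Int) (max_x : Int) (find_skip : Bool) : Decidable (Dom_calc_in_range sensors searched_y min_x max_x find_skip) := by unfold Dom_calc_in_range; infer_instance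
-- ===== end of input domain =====

-- B replaces A's single stateful sweep by a two-phase pipeline: coalesce the sorted clamped
-- intervals into an explicit list of disjoint merged segments, then answer by a separate query
-- pass over that list (objective: alternative decomposition, same asymptotic cost).

-- ===== PORT A =====
-- shared module helper (used verbatim by both Pythons)
def sensor_interval (sensor : Int × Int × Int × Int) (searched_y : Int) : Option (Int × Int) :=
  let x := sensor.1
  let y := sensor.2.1
  let bx := sensor.2.2.1
  let by_ := sensor.2.2.2
  let radius := |bx - x| + |by_ - y|
  let x_range := radius - |searched_y - y|
  if x_range < 0 then none
  else some (x - x_range, x + x_range)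

-- A's for-loop over sorted(intervals) with running state (x, s) and the early return
def loopA (min_x max_x : Int) (find_skip : Bool) : List (Int × Int) → Int → Int → Int
  | [], _, s => s
  | (f, t) :: rest, x, s =>
    let from_x := max f min_x
    let to_x := min t max_x
    if x < from_x then
      if find_skip then x + 1
      else loopA min_x max_x find_skip rest (max from_x to_x) (s + max 0 (to_x - from_x))
    else loopA min_x max_x find_skip rest (max x to_x) (s + max 0 (to_x - x))

def calc_in_range (sensors : List (Int × Int × Int × Int)) (searched_y : Int) (min_x : Int) (max_x : Int) (find_skip : Bool) : Int :=
  let intervals := PySem.List.sorted2 (sensors.filterMap (fun s => sensor_interval s searched_y)) Prod.fst Prod.snd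
  loopA min_x max_x find_skip intervals min_x 0

-- ===== PORT B =====
-- B phase 1: one merge step of the python loop (append, or extend merged[-1])
def mergeStep (min_x max_x : Int) (merged : List (Int × Int)) (ft : Int × Int) : List (Int × Int) :=
  let lo := max ft.1 min_x
  let hi := max lo (min ft.2 max_x)
  match merged.getLast? with
  | some (l0, h0) =>
    if lo ≤ h0 then
      if h0 < hi then merged.dropLast ++ [(l0, hi)] else merged
    else merged ++ [(lo, hi)]
  | none => merged ++ [(lo, hi)]

-- B phase 2 (find_skip): scan for the first gap between merged segments
def firstGap : List (Int × Int) → Int → Option Int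
  | [], _ => none
  | (lo, hi) :: rest, prev => if prev < lo then some (prev + 1) else firstGap rest hi

def calc_in_range_alt (sensors : List (Int × Int × Int × Int)) (searched_y : Int) (min_x : Int) (max_x : Int) (find_skip : Bool) : Int :=
  let intervals := PySem.List.sorted2 (sensors.filterMap (fun s => sensor_interval s searched_y)) Prod.fst Prod.snd
  let merged := intervals.foldl (mergeStep min_x max_x) []
  if find_skip then
    match firstGap merged min_x with
    | some g => g
    | none => (merged.map (fun p => p.2 - p.1)).sum
  else (merged.map (fun p => p.2 - p.1)).sum

-- ===== PRECONDITION & SPEC =====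
def Spec_calc_in_range (sensors : List (Int × Int × Int × Int)) (searched_y : Int) (min_x : Int) (max_x : Int) (find_skip : Bool) (out : Int) : Prop := out = calc_in_range_alt sensors searched_y min_x max_x find_skip
instance (sensors : List (Int × Int × Int × Int)) (searched_y : Int) (min_x : Int) (max_x : Int) (find_skip : Bool) (out : Int) : Decidable (Spec_calc_in_range sensors searched_y min_x max_x find_skip out) := by unfold Spec_calc_in_range; infer_instance

-- ===== CLAIM (what is proved, stated in full; the proofs are below) =====
def Claim_equal_calc_in_range : Prop := ∀ (sensors : List (Int × Int × Int × Int)) (searched_y : Int) (min_x : Int) (max_x : Int) (find_skip : Bool), Dom_calc_in_range sensors searched_y min_x max_x find_skip → Spec_calc_in_range sensors searched_y min_x max_x find_skip (calc_in_range sensors searched_y min_x max_x find_skip)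

-- ===== LEMMAS AND PROOFS =====

-- B's merge fold, seen on the REVERSED accumulator (head = python's merged[-1])
def mergeRev (min_x max_x : Int) : List (Int × Int) → List (Int × Int) → List (Int × Int)
  | accR, [] => accR
  | [], ft :: rest =>
    mergeRev min_x max_x [(max ft.1 min_x, max (max ft.1 min_x) (min ft.2 max_x))] rest
  | (l0, h0) :: tl, ft :: rest =>
    if max ft.1 min_x ≤ h0 then
      mergeRev min_x max_x ((l0, max h0 (max (max ft.1 min_x) (min ft.2 max_x))) :: tl) rest
    else mergeRev min_x max_x ((max ft.1 min_x, max (max ft.1 min_x) (min ft.2 max_x)) :: (l0, h0) :: tl) rest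

-- total length of a segment list
def segSum (l : List (Int × Int)) : Int := (l.map (fun p => p.2 - p.1)).sum

lemma foldl_mergeStep (m M : Int) (ivs : List (Int × Int)) :
    ∀ accR : List (Int × Int),
      ivs.foldl (mergeStep m M) accR.reverse = (mergeRev m M accR ivs).reverse := by
  induction ivs with
  | nil => intro accR; simp [mergeRev]
  | cons c rest ih =>
    intro accR
    rw [List.foldl_cons]
    match accR with
    | [] =>
      have h1 : mergeStep m M (([] : List (Int × Int)).reverse) c =
          ([(max c.1 m, max (max c.1 m) (min c.2 M))] : List (Int × Int)).reverse := by
        simp [mergeStep]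
      rw [h1, ih]
      simp only [mergeRev]
    | (l0, h0) :: tl =>
      have hstep : mergeStep m M (((l0, h0) :: tl).reverse) c =
          (if max c.1 m ≤ h0 then ((l0, max h0 (max (max c.1 m) (min c.2 M))) :: tl).reverse
           else ((max c.1 m, max (max c.1 m) (min c.2 M)) :: (l0, h0) :: tl).reverse) := by
        simp only [mergeStep, List.reverse_cons, List.getLast?_concat, List.dropLast_concat]
        by_cases h1 : max c.1 m ≤ h0
        · rw [if_pos h1, if_pos h1]
          by_cases h2 : h0 < max (max c.1 m) (min c.2 M)
          · rw [if_pos h2]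
            have hmx : max h0 (max (max c.1 m) (min c.2 M)) = max (max c.1 m) (min c.2 M) := by
              omega
            rw [hmx]
          · rw [if_neg h2]
            have hmx : max h0 (max (max c.1 m) (min c.2 M)) = h0 := by omega
            rw [hmx]
        · rw [if_neg h1, if_neg h1]
      rw [hstep]
      by_cases hle : max c.1 m ≤ h0
      · rw [if_pos hle, ih]
        simp only [mergeRev]
        rw [if_pos hle]
      · rw [if_neg hle, ih]
        simp only [mergeRev]
        rw [if_neg hle]

lemma segSum_reverse (l : List (Int × Int)) : segSum l.reverse = segSum l := by
  simp [segSum]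

-- structure of the merge fold: the head segment may only grow on the right,
-- everything below it (and its left end) is frozen
lemma mergeRev_structure (m M : Int) (ivs : List (Int × Int)) :
    ∀ (l0 h0 : Int) (tl : List (Int × Int)),
      ∃ out h', h0 ≤ h' ∧ mergeRev m M ((l0, h0) :: tl) ivs = out ++ (l0, h') :: tl := by
  induction ivs with
  | nil => intro l0 h0 tl; exact ⟨[], h0, le_refl _, rfl⟩
  | cons c rest ih =>
    intro l0 h0 tl
    simp only [mergeRev]
    by_cases hle : max c.1 m ≤ h0
    · rw [if_pos hle]
      obtain ⟨out, h', hh, heq⟩ := ih l0 (max h0 (max (max c.1 m) (min c.2 M))) tl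
      exact ⟨out, h', le_trans (le_max_left _ _) hh, heq⟩
    · rw [if_neg hle]
      obtain ⟨out, h', hh, heq⟩ := ih (max c.1 m) (max (max c.1 m) (min c.2 M)) ((l0, h0) :: tl)
      exact ⟨out ++ [(max c.1 m, h')], h0, le_refl _, by simpa using heq⟩

-- A's sweep without find_skip accumulates exactly the merged-segment lengths
lemma sum_inv (m M : Int) (ivs : List (Int × Int)) :
    ∀ (l0 h0 : Int) (tl : List (Int × Int)) (s : Int),
      loopA m M false ivs h0 s =
        s - segSum ((l0, h0) :: tl) + segSum (mergeRev m M ((l0, h0) :: tl) ivs) := by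
  induction ivs with
  | nil => intro l0 h0 tl s; simp [loopA, mergeRev]
  | cons c rest ih =>
    intro l0 h0 tl s
    obtain ⟨f, t⟩ := c
    simp only [loopA, mergeRev, Bool.false_eq_true, if_false]
    by_cases hgap : h0 < max f m
    · rw [if_pos hgap, if_neg (by omega : ¬ max f m ≤ h0)]
      rw [ih (max f m) (max (max f m) (min t M)) ((l0, h0) :: tl)]
      simp only [segSum, List.map_cons, List.sum_cons]
      omega
    · rw [if_neg hgap, if_pos (by omega : max f m ≤ h0)]
      have harg : max h0 (min t M) = max h0 (max (max f m) (min t M)) := by omega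
      rw [harg, ih l0 (max h0 (max (max f m) (min t M))) tl]
      simp only [segSum, List.map_cons, List.sum_cons]
      omega

lemma sum_start (m M : Int) (ivs : List (Int × Int)) :
    loopA m M false ivs m 0 = segSum (mergeRev m M [] ivs) := by
  match ivs with
  | [] => simp [loopA, mergeRev, segSum]
  | (f, t) :: rest =>
    simp only [loopA, mergeRev, Bool.false_eq_true, if_false]
    by_cases hgap : m < max f m
    · rw [if_pos hgap]
      rw [sum_inv m M rest (max f m) (max (max f m) (min t M)) [] (0 + max 0 (min t M - max f m))]
      simp only [segSum, List.map_cons, List.sum_cons, List.map_nil, List.sum_nil]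
      omega
    · rw [if_neg hgap]
      have harg : max m (min t M) = max (max f m) (min t M) := by omega
      rw [harg]
      rw [sum_inv m M rest (max f m) (max (max f m) (min t M)) [] (0 + max 0 (min t M - m))]
      simp only [segSum, List.map_cons, List.sum_cons, List.map_nil, List.sum_nil]
      omega

-- B's answer shape for find_skip
def gapQuery (m : Int) (merged : List (Int × Int)) : Int :=
  match firstGap merged m with
  | some g => g
  | none => segSum merged

-- A's find_skip sweep against the merged segments, from the reachable single-segment state
lemma fs_inv (m M : Int) (ivs : List (Int × Int)) :
    ∀ h0 : Int, m ≤ h0 →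
      loopA m M true ivs h0 (h0 - m) = gapQuery m ((mergeRev m M [(m, h0)] ivs).reverse) := by
  induction ivs with
  | nil =>
    intro h0 hm
    simp [loopA, mergeRev, gapQuery, firstGap, segSum]
  | cons c rest ih =>
    intro h0 hm
    obtain ⟨f, t⟩ := c
    simp only [loopA, mergeRev]
    by_cases hgap : h0 < max f m
    · rw [if_pos hgap, if_neg (by omega : ¬ max f m ≤ h0)]
      obtain ⟨out, h', hh, heq⟩ :=
        mergeRev_structure m M rest (max f m) (max (max f m) (min t M)) [(m, h0)]
      rw [heq]
      simp only [gapQuery, List.reverse_append, List.reverse_cons, List.reverse_nil,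
        List.nil_append, List.cons_append, firstGap]
      rw [if_neg (by omega : ¬ m < m), if_pos (by omega : h0 < max f m)]
      simp
    · rw [if_neg hgap, if_pos (by omega : max f m ≤ h0)]
      have harg : max h0 (min t M) = max h0 (max (max f m) (min t M)) := by omega
      have hs : h0 - m + max 0 (min t M - h0) = max h0 (max (max f m) (min t M)) - m := by omega
      rw [harg, hs]
      exact ih (max h0 (max (max f m) (min t M))) (by omega)

lemma fs_start (m M : Int) (ivs : List (Int × Int)) :
    loopA m M true ivs m 0 = gapQuery m ((mergeRev m M [] ivs).reverse) := by
  match ivs with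
  | [] => simp [loopA, mergeRev, gapQuery, firstGap, segSum]
  | (f, t) :: rest =>
    simp only [loopA, mergeRev]
    by_cases hgap : m < max f m
    · rw [if_pos hgap]
      obtain ⟨out, h', hh, heq⟩ :=
        mergeRev_structure m M rest (max f m) (max (max f m) (min t M)) []
      rw [heq]
      simp only [gapQuery, List.reverse_append, List.reverse_cons, List.reverse_nil,
        List.nil_append, List.cons_append, firstGap]
      rw [if_pos (by omega : m < max f m)]
      simp
    · rw [if_neg hgap]
      have hfm : max f m = m := by omega
      rw [hfm]
      have hs : 0 + max 0 (min t M - m) = max m (min t M) - m := by omega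
      rw [hs]
      exact fs_inv m M rest (max m (min t M)) (by omega)

-- ===== VERDICT (by name: the statement is the Claim_ definition above) =====
theorem calc_in_range_spec : Claim_equal_calc_in_range := by
  intro sensors searched_y min_x max_x find_skip _
  show calc_in_range sensors searched_y min_x max_x find_skip
      = calc_in_range_alt sensors searched_y min_x max_x find_skip
  simp only [calc_in_range, calc_in_range_alt]
  have hfold := foldl_mergeStep min_x max_x
    (PySem.List.sorted2 (sensors.filterMap (fun s => sensor_interval s searched_y)) Prod.fst Prod.snd) []
  simp only [List.reverse_nil] at hfold
  rw [hfold]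
  cases find_skip with
  | false =>
    simp only [Bool.false_eq_true, if_false]
    rw [sum_start min_x max_x _]
    exact (segSum_reverse _).symm
  | true =>
    simp only [if_true]
    rw [fs_start min_x max_x _]
    rfl
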